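-- pv_equiv track=rewrite | github.com/gafniasaf/blank-canvas | scripts/rename-remaining-images.py | get_page_name
-- ===== SOURCE A (Python) =====
-- SPECIAL_PAGES = {
--     0: "frontmatter_blank",
--     1: "title_page",
--     2: "frontmatter_p2",
--     3: "colophon",
--     4: "frontmatter_p4",
--     5: "toc_p1",
--     6: "toc_p2",
--     7: "promo_mboleren",
--     8: "frontmatter_p8",
--     9: "frontmatter_p9",
--     10: "frontmatter_p10",
--     11: "frontmatter_p11",
--     12: "frontmatter_p12",
--     13: "intro_opener",
--     14: "intro_p1",
--     15: "intro_p2",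
--     16: "intro_p3",
--     17: "intro_p4",
--     18: "intro_p5",
--     19: "intro_p6",
--     20: "ch1_opener",
-- }
--
-- CHAPTER_RANGES = [
--     (21, 50, 1),
--     (52, 64, 2),
--     (66, 108, 3),
--     (110, 152, 4),
--     (154, 194, 5),
--     (197, 242, 6),
--     (244, 272, 7),
--     (274, 322, 8),
--     (325, 352, 9),
--     (354, 370, 10),
--     (373, 406, 11),
--     (408, 444, 12),
--     (446, 456, 13),
--     (458, 519, 14),
-- ]
--
-- def get_chapter_for_page(page_num):
--     """Determine which chapter a page belongs to."""
--     for start, end, ch in CHAPTER_RANGES: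
--         if start <= page_num <= end:
--             return ch
--     return None
--
-- def get_page_name(page_num):
--     """Generate a descriptive name for a page."""
--     if page_num in SPECIAL_PAGES:
--         return SPECIAL_PAGES[page_num]
--
--     # Check chapter openers (page before chapter start)
--     for start, end, ch in CHAPTER_RANGES:
--         if page_num == start - 1:
--             return f"ch{ch}_opener"
--
--     # Check if in a chapter
--     ch = get_chapter_for_page(page_num)
--     if ch:
--         return f"ch{ch}_uncaptioned_p{page_num}"
--
--     # Back matter (after ch14)
--     if page_num > 519:
--         return f"backmatter_p{page_num}"
--
--     return f"page_{page_num:03d}"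
-- ===== SOURCE B (Python) =====
-- import bisect
--
-- SPECIAL_PAGES = {
--     0: "frontmatter_blank", 1: "title_page", 2: "frontmatter_p2", 3: "colophon",
--     4: "frontmatter_p4", 5: "toc_p1", 6: "toc_p2", 7: "promo_mboleren",
--     8: "frontmatter_p8", 9: "frontmatter_p9", 10: "frontmatter_p10",
--     11: "frontmatter_p11", 12: "frontmatter_p12", 13: "intro_opener",
--     14: "intro_p1", 15: "intro_p2", 16: "intro_p3", 17: "intro_p4",
--     18: "intro_p5", 19: "intro_p6", 20: "ch1_opener",
-- }
--
-- # chapter k (1-based) runs from _CH_STARTS[k-1] to _CH_ENDS[k-1]; both lists sorted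
-- _CH_STARTS = [21, 52, 66, 110, 154, 197, 244, 274, 325, 354, 373, 408, 446, 458]
-- _CH_ENDS   = [50, 64, 108, 152, 194, 242, 272, 322, 352, 370, 406, 444, 456, 519]
--
-- def get_page_name(page_num):
--     """Generate a descriptive name for a page."""
--     name = SPECIAL_PAGES.get(page_num)
--     if name is not None:
--         return name
--     # candidate chapter: the last one whose start <= page_num + 1 (binary search)
--     i = bisect.bisect_right(_CH_STARTS, page_num + 1) - 1
--     if i >= 0:
--         ch = i + 1
--         if page_num == _CH_STARTS[i] - 1:
--             return f"ch{ch}_opener"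
--         if page_num <= _CH_ENDS[i]:
--             return f"ch{ch}_uncaptioned_p{page_num}"
--     if page_num > 519:
--         return f"backmatter_p{page_num}"
--     return f"page_{page_num:03d}"
-- ===== Notes on version B (the rewrite author's own statement) =====
-- stated objective: alternative
-- what changed: A's two sequential linear scans over CHAPTER_RANGES (opener scan plus get_chapter_for_page) are replaced by a single binary search (bisect.bisect_right) over the sorted chapter-start list, which locates the one candidate chapter and decides opener/in-chapter by two comparisons.
import Mathlib
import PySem

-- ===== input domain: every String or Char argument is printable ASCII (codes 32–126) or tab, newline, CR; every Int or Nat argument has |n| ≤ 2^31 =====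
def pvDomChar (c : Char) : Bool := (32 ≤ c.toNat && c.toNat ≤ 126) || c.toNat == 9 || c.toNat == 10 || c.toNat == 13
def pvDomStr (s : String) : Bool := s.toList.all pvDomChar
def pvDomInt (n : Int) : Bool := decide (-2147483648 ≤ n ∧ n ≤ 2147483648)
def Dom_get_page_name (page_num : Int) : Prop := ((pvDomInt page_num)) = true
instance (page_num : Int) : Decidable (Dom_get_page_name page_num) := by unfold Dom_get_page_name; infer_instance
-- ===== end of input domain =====

-- B replaces A's two linear scans over CHAPTER_RANGES by one binary search on the sorted chapter starts (alternative algorithm).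


-- shared module-level dict of both versions
def SPECIAL_PAGES : PySem.Dict Int String := PySem.Dict.mk
  [(0, "frontmatter_blank"), (1, "title_page"), (2, "frontmatter_p2"), (3, "colophon"),
   (4, "frontmatter_p4"), (5, "toc_p1"), (6, "toc_p2"), (7, "promo_mboleren"),
   (8, "frontmatter_p8"), (9, "frontmatter_p9"), (10, "frontmatter_p10"),
   (11, "frontmatter_p11"), (12, "frontmatter_p12"), (13, "intro_opener"),
   (14, "intro_p1"), (15, "intro_p2"), (16, "intro_p3"), (17, "intro_p4"),
   (18, "intro_p5"), (19, "intro_p6"), (20, "ch1_opener")]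

-- f"{n:03d}" (exact: zero-pad after the sign to total width 3); format primitive shared by both ports
def fmt03 (n : Int) : List Char :=
  let ds := PySem.Int.toChars n
  if n < 0 then '-' :: (List.replicate (3 - ds.length) '0' ++ ds.tail)
  else List.replicate (3 - ds.length) '0' ++ ds

-- ===== PORT A =====
def CHAPTER_RANGES : List (Int × Int × Int) :=
  [(21, 50, 1), (52, 64, 2), (66, 108, 3), (110, 152, 4), (154, 194, 5),
   (197, 242, 6), (244, 272, 7), (274, 322, 8), (325, 352, 9), (354, 370, 10),
   (373, 406, 11), (408, 444, 12), (446, 456, 13), (458, 519, 14)]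

def chOpener (c : Int) : String :=
  String.ofList ("ch".toList ++ PySem.Int.toChars c ++ "_opener".toList)
def chUncaptioned (c p : Int) : String :=
  String.ofList ("ch".toList ++ PySem.Int.toChars c ++ "_uncaptioned_p".toList ++ PySem.Int.toChars p)
-- the common final two returns: backmatter / default name
def tailName (n : Int) : String :=
  if n > 519 then String.ofList ("backmatter_p".toList ++ PySem.Int.toChars n)
  else String.ofList ("page_".toList ++ fmt03 n)

-- the 'for start, end, ch in CHAPTER_RANGES: if page_num == start - 1: return …' loop
def openerScan : List (Int × Int × Int) → Int → Option String
  | [], _ => none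
  | (s, _, c) :: rest, n => if n = s - 1 then some (chOpener c) else openerScan rest n

def get_chapter_for_page_aux : List (Int × Int × Int) → Int → Option Int
  | [], _ => none
  | (s, e, c) :: rest, n => if s ≤ n ∧ n ≤ e then some c else get_chapter_for_page_aux rest n

def get_chapter_for_page (page_num : Int) : Option Int :=
  get_chapter_for_page_aux CHAPTER_RANGES page_num

def get_page_name (page_num : Int) : String :=
  match SPECIAL_PAGES.get? page_num with
  | some v => v
  | none =>
    match openerScan CHAPTER_RANGES page_num with
    | some v => v
    | none =>
      match get_chapter_for_page page_num with
      | some ch =>   -- Python's 'if ch:' is false for ch == 0 as well as for None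
        if ch = 0 then tailName page_num
        else chUncaptioned ch page_num
      | none => tailName page_num

-- ===== PORT B =====
def CH_STARTS : List Int := [21, 52, 66, 110, 154, 197, 244, 274, 325, 354, 373, 408, 446, 458]
def CH_ENDS   : List Int := [50, 64, 108, 152, 194, 242, 272, 322, 352, 370, 406, 444, 456, 519]

-- bisect.bisect_right(a, x): CPython's while-loop on lo, hi; the fuel argument (len a is
-- always enough, the interval halves each step) only makes the loop structurally recursive.
def bisectGo (a : List Int) (x : Int) : Nat → Nat → Nat → Nat
  | 0, lo, _ => lo
  | fuel + 1, lo, hi =>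
    if lo < hi then
      let mid := (lo + hi) / 2
      if x < a.getD mid 0 then bisectGo a x fuel lo mid
      else bisectGo a x fuel (mid + 1) hi
    else lo

def bisectRight (a : List Int) (x : Int) : Nat :=
  bisectGo a x a.length 0 a.length

def get_page_name_alt (page_num : Int) : String :=
  match SPECIAL_PAGES.get? page_num with
  | some name => name
  | none =>
    let i : Int := (bisectRight CH_STARTS (page_num + 1) : Int) - 1
    if 0 ≤ i then
      -- i ≤ 13 always, so the Python indexing _CH_STARTS[i] / _CH_ENDS[i] is in range
      if page_num = CH_STARTS.getD i.toNat 0 - 1 then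
        String.ofList ("ch".toList ++ PySem.Int.toChars (i + 1) ++ "_opener".toList)
      else if page_num ≤ CH_ENDS.getD i.toNat 0 then
        String.ofList ("ch".toList ++ PySem.Int.toChars (i + 1) ++ "_uncaptioned_p".toList ++ PySem.Int.toChars page_num)
      else if page_num > 519 then
        String.ofList ("backmatter_p".toList ++ PySem.Int.toChars page_num)
      else String.ofList ("page_".toList ++ fmt03 page_num)
    else if page_num > 519 then
      String.ofList ("backmatter_p".toList ++ PySem.Int.toChars page_num)
    else String.ofList ("page_".toList ++ fmt03 page_num)

-- ===== PRECONDITION & SPEC =====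
def Spec_get_page_name (page_num : Int) (out : String) : Prop := out = get_page_name_alt page_num
instance (page_num : Int) (out : String) : Decidable (Spec_get_page_name page_num out) := by unfold Spec_get_page_name; infer_instance

-- ===== CLAIM (what is proved, stated in full; the proofs are below) =====
def Claim_equal_get_page_name : Prop := ∀ (page_num : Int), Dom_get_page_name page_num → Spec_get_page_name page_num (get_page_name page_num)

-- ===== LEMMAS AND PROOFS =====

-- the bounded region 0..520: checked pointwise
set_option maxRecDepth 100000 in
set_option maxHeartbeats 2000000 in
theorem bounded_eq : ∀ k : Nat, k ≤ 520 → get_page_name (k : Int) = get_page_name_alt (k : Int) := by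
  decide

theorem sp_none {n : Int} (h : n < 0 ∨ n > 20) : SPECIAL_PAGES.get? n = none := by
  simp only [SPECIAL_PAGES, PySem.Dict.get?_mk_cons]
  repeat rw [if_neg (by simp; omega)]
  rfl

theorem opener_none {n : Int} (h : n < 0 ∨ n > 519) : openerScan CHAPTER_RANGES n = none := by
  simp only [CHAPTER_RANGES, openerScan]
  repeat rw [if_neg (by omega)]

theorem chapter_none {n : Int} (h : n < 0 ∨ n > 519) : get_chapter_for_page n = none := by
  simp only [get_chapter_for_page, CHAPTER_RANGES, get_chapter_for_page_aux]
  repeat rw [if_neg (by omega)]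

theorem go_left {a : List Int} {x : Int} {fuel lo hi : Nat} (h1 : lo < hi)
    (h2 : x < a.getD ((lo + hi) / 2) 0) :
    bisectGo a x (fuel + 1) lo hi = bisectGo a x fuel lo ((lo + hi) / 2) := by
  simp only [bisectGo, if_pos h1]; rw [if_pos h2]

theorem go_right {a : List Int} {x : Int} {fuel lo hi : Nat} (h1 : lo < hi)
    (h2 : ¬ x < a.getD ((lo + hi) / 2) 0) :
    bisectGo a x (fuel + 1) lo hi = bisectGo a x fuel ((lo + hi) / 2 + 1) hi := by
  simp only [bisectGo, if_pos h1]; rw [if_neg h2]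

theorem go_stop {a : List Int} {x : Int} {fuel lo hi : Nat} (h1 : ¬ lo < hi) :
    bisectGo a x (fuel + 1) lo hi = lo := by
  simp only [bisectGo, if_neg h1]

theorem bisect_hi {x : Int} (h : 459 ≤ x) : bisectRight CH_STARTS x = 14 := by
  show bisectGo CH_STARTS x (13 + 1) 0 14 = 14
  rw [go_right (by omega) (by norm_num [CH_STARTS]; omega)]
  show bisectGo CH_STARTS x (12 + 1) 8 14 = 14
  rw [go_right (by omega) (by norm_num [CH_STARTS]; omega)]
  show bisectGo CH_STARTS x (11 + 1) 12 14 = 14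
  rw [go_right (by omega) (by norm_num [CH_STARTS]; omega)]
  show bisectGo CH_STARTS x (10 + 1) 14 14 = 14
  rw [go_stop (by omega)]

theorem bisect_lo {x : Int} (h : x ≤ 20) : bisectRight CH_STARTS x = 0 := by
  show bisectGo CH_STARTS x (13 + 1) 0 14 = 0
  rw [go_left (by omega) (by norm_num [CH_STARTS]; omega)]
  show bisectGo CH_STARTS x (12 + 1) 0 7 = 0
  rw [go_left (by omega) (by norm_num [CH_STARTS]; omega)]
  show bisectGo CH_STARTS x (11 + 1) 0 3 = 0
  rw [go_left (by omega) (by norm_num [CH_STARTS]; omega)]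
  show bisectGo CH_STARTS x (10 + 1) 0 1 = 0
  rw [go_left (by omega) (by norm_num [CH_STARTS]; omega)]
  show bisectGo CH_STARTS x (9 + 1) 0 0 = 0
  rw [go_stop (by omega)]

theorem a_out {n : Int} (h : n < 0 ∨ n > 519) : get_page_name n = tailName n := by
  unfold get_page_name
  rw [sp_none (by omega), opener_none h, chapter_none h]

theorem alt_neg {n : Int} (h : n < 0) : get_page_name_alt n = tailName n := by
  unfold get_page_name_alt
  rw [sp_none (by omega)]
  show (if (0:Int) ≤ (bisectRight CH_STARTS (n + 1) : Int) - 1 then _ else _) = _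
  rw [bisect_lo (by omega)]
  rw [if_neg (by omega), if_neg (by omega)]
  simp only [tailName]
  rw [if_neg (by omega)]

theorem alt_big {n : Int} (h : n > 519) : get_page_name_alt n = tailName n := by
  unfold get_page_name_alt
  rw [sp_none (by omega)]
  show (if (0:Int) ≤ (bisectRight CH_STARTS (n + 1) : Int) - 1 then _ else _) = _
  rw [bisect_hi (by omega)]
  rw [if_pos (by omega)]
  rw [if_neg (show ¬ n = CH_STARTS.getD (((14:Nat):Int) - 1).toNat 0 - 1 from by
        rw [show CH_STARTS.getD (((14:Nat):Int) - 1).toNat 0 = 458 from by decide]; omega)]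
  rw [if_neg (show ¬ n ≤ CH_ENDS.getD (((14:Nat):Int) - 1).toNat 0 from by
        rw [show CH_ENDS.getD (((14:Nat):Int) - 1).toNat 0 = 519 from by decide]; omega)]
  rw [if_pos (by omega)]
  simp only [tailName]
  rw [if_pos (by omega)]

-- ===== VERDICT (by name: the statement is the Claim_ definition above) =====
theorem get_page_name_spec : Claim_equal_get_page_name := by
  intro n _
  unfold Spec_get_page_name
  by_cases hb : 0 ≤ n ∧ n ≤ 520
  · have h := bounded_eq n.toNat (by omega)
    rwa [Int.toNat_of_nonneg hb.1] at h
  · by_cases hneg : n < 0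
    · rw [a_out (Or.inl hneg), alt_neg hneg]
    · have hbig : n > 519 := by omega
      rw [a_out (Or.inr hbig), alt_big hbig]
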